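-- pv_equiv track=rewrite | github.com/youhusky/Leetcode-2018 | Quip/list_compare.py | origin
-- ===== SOURCE A (Python) =====
-- def origin(a,b):
-- 	# T O(2(m + n))
-- 	# S O(m + n)
-- 	dic = dict()
-- 	res = []
-- 	for each in a+b:
-- 		dic[each] = dic.get(each,0) + 1
-- 	# without order
-- 	for key in dic:
-- 		if dic[key] == 1:
-- 			res.append(key)
--
-- 	# with order
-- 	# for each in a+b:
-- 	# 	if dic[each] == 1:
-- 	# 		res.append(each)
-- 	return res
-- ===== SOURCE B (Python) =====
-- def origin(a, b):
--     # Single pass: keep an insertion-ordered dict of elements seen exactly once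
--     # and a set of elements seen more than once.
--     once = dict()
--     multiple = set()
--     for x in a + b:
--         if x in multiple:
--             continue
--         elif x in once:
--             del once[x]
--             multiple.add(x)
--         else:
--             once[x] = True
--     return list(once.keys())
-- ===== Notes on version B (the rewrite author's own statement) =====
-- stated objective: alternative
-- what changed: Replaces the count-then-filter two passes (build a full counter dict, then scan its keys for count == 1) by a single pass over a+b that maintains an insertion-ordered dict of elements seen exactly once and a set of elements seen more than once, returning the dict's keys.
import Mathlib
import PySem

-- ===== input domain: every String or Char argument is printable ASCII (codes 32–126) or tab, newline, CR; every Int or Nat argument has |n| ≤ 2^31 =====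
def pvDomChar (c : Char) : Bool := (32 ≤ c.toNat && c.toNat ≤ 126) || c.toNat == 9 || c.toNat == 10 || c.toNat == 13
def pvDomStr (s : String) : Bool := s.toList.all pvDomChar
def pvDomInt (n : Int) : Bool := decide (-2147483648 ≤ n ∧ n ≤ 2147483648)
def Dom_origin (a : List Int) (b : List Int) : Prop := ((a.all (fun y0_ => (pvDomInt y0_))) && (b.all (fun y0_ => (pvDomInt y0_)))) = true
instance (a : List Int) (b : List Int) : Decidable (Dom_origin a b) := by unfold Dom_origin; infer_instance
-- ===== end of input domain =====

-- B replaces A's count-then-filter two passes with a single pass maintaining an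
-- ordered dict of once-seen elements and a set of multiply-seen elements (alternative decomposition, same cost).


-- ===== PORT A =====
-- dic[each] = dic.get(each, 0) + 1 over a+b, then append keys whose count is 1, in dict (insertion) order
def origin (a : List Int) (b : List Int) : List Int :=
  let dic : PySem.Dict Int Int :=
    (a ++ b).foldl (fun d each => d.insert each ((d.get? each).getD 0 + 1)) PySem.Dict.empty
  dic.keys.foldl (fun res key => if (dic.get? key).getD 0 == 1 then res ++ [key] else res) []

-- ===== PORT B =====
-- one step of B's loop: skip if in multiple; move once→multiple on second sight; else record in once
def originAltStep (st : PySem.Dict Int Bool × PySem.Set Int) (x : Int) :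
    PySem.Dict Int Bool × PySem.Set Int :=
  if st.2.contains x then st
  else if st.1.contains x then (st.1.erase x, st.2.add x)
  else (st.1.insert x true, st.2)

def origin_alt (a : List Int) (b : List Int) : List Int :=
  ((a ++ b).foldl originAltStep (PySem.Dict.empty, PySem.Set.empty)).1.keys

-- ===== PRECONDITION & SPEC =====
def Spec_origin (a : List Int) (b : List Int) (out : List Int) : Prop := out = origin_alt a b
instance (a : List Int) (b : List Int) (out : List Int) : Decidable (Spec_origin a b out) := by unfold Spec_origin; infer_instance

-- ===== CLAIM (what is proved, stated in full; the proofs are below) =====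
def Claim_equal_origin : Prop := ∀ (a : List Int) (b : List Int), Dom_origin a b → Spec_origin a b (origin a b)

-- ===== LEMMAS AND PROOFS =====

-- loop invariant for B: after processing l, `once` holds exactly the elements with count 1
-- (in first-occurrence order, each mapped to true) and `multiple` exactly those with count ≥ 2
theorem alt_loop_inv (l : List Int) :
    (l.foldl originAltStep (PySem.Dict.empty, PySem.Set.empty)).1.items
      = ((PySem.Set.ofList l).filter (fun k => l.count k == 1)).map (fun k => (k, true))
  ∧ ∀ x : Int, x ∈ (l.foldl originAltStep (PySem.Dict.empty, PySem.Set.empty)).2 ↔ 2 ≤ l.count x := by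
  induction l using List.reverseRecOn with
  | nil => constructor <;> simp [PySem.Set.ofList, PySem.Dict.empty, PySem.Set.empty]
  | append_singleton l x ih =>
    obtain ⟨h1, h2⟩ := ih
    rw [List.foldl_append]
    set st := l.foldl originAltStep (PySem.Dict.empty, PySem.Set.empty) with hst
    have hkeys : st.1.keys = (PySem.Set.ofList l).filter (fun k => l.count k == 1) := by
      simp [PySem.Dict.keys, h1, Function.comp_def]
    have hmul : (st.2.contains x = true) ↔ 2 ≤ l.count x :=
      (PySem.Set.contains_iff _ _).trans (h2 x)
    have honce : (st.1.contains x = true) ↔ (x ∈ l ∧ l.count x = 1) := by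
      rw [PySem.Dict.contains_iff_mem_keys, hkeys]
      simp [List.mem_filter, PySem.Set.mem_ofList]
    rcases Nat.lt_or_ge (l.count x) 2 with hlt | hge
    · obtain hc | hc : l.count x = 0 ∨ l.count x = 1 := by omega
      · -- count 0: x is fresh
        have hx : x ∉ l := by
          intro h; have := List.count_pos_iff.mpr h; omega
        have hm : st.2.contains x = false := by
          rw [← Bool.not_eq_true]; simp [PySem.Set.contains_iff, h2, hc]
        have ho : st.1.contains x = false := by
          rw [← Bool.not_eq_true]; simp [honce, hx]
        simp only [List.foldl_cons, List.foldl_nil, originAltStep, hm, ho, Bool.false_eq_true, if_false]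
        constructor
        · rw [PySem.Dict.items_insert_of_not_contains _ _ ho, h1,
              PySem.Set.ofList_append_singleton, PySem.Set.add_of_not_mem
                (by simp [PySem.Set.mem_ofList, hx]),
              List.filter_append]
          have hcongr : ((PySem.Set.ofList l).filter (fun k => (l ++ [x]).count k == 1))
              = (PySem.Set.ofList l).filter (fun k => l.count k == 1) := by
            apply List.filter_congr
            intro k hk
            have hkx : k ≠ x := fun h => hx (h ▸ (PySem.Set.mem_ofList l k).mp hk)
            simp [List.count_append, List.count_cons, List.count_nil, hkx, Ne.symm hkx]
          rw [hcongr]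
          simp [List.count_append, List.count_cons, List.count_nil, hc]
        · intro y
          rw [h2 y]
          by_cases hyx : y = x
          · subst hyx; simp [List.count_append, List.count_cons, List.count_nil, hc]
          · simp [List.count_append, List.count_cons, List.count_nil, Ne.symm hyx]
      · -- count 1: move x from once to multiple
        have hx : x ∈ l := List.count_pos_iff.mp (by omega)
        have hm : st.2.contains x = false := by
          rw [← Bool.not_eq_true]; simp [PySem.Set.contains_iff, h2, hc]
        have ho : st.1.contains x = true := honce.mpr ⟨hx, hc⟩
        simp only [List.foldl_cons, List.foldl_nil, originAltStep, hm, ho, Bool.false_eq_true, if_false, if_true]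
        constructor
        · show (st.1.erase x).items = _
          rw [PySem.Set.ofList_append_singleton, PySem.Set.add_of_mem
              ((PySem.Set.mem_ofList l x).mpr hx)]
          simp only [PySem.Dict.erase, h1, List.filter_map]
          rw [show ((fun p : Int × Bool => !p.1 == x) ∘ fun k => (k, true)) = (fun k => !k == x)
              from rfl, List.filter_filter]
          congr 1
          apply List.filter_congr
          intro k _
          by_cases hkx : k = x
          · subst hkx; simp [List.count_append, List.count_cons, List.count_nil, hc]
          · simp [List.count_append, List.count_cons, List.count_nil, hkx, Ne.symm hkx]
        · intro y
          rw [PySem.Set.mem_add, h2 y]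
          by_cases hyx : y = x
          · subst hyx; simp [List.count_append, List.count_cons, List.count_nil, hc]
          · simp [List.count_append, List.count_cons, List.count_nil, hyx, Ne.symm hyx]
    · -- count ≥ 2: x already in multiple, no change
      have hx : x ∈ l := List.count_pos_iff.mp (by omega)
      have hm : st.2.contains x = true := hmul.mpr hge
      simp only [List.foldl_cons, List.foldl_nil, originAltStep, hm, if_true]
      constructor
      · rw [h1, PySem.Set.ofList_append_singleton, PySem.Set.add_of_mem
            ((PySem.Set.mem_ofList l x).mpr hx)]
        congr 1
        apply List.filter_congr
        intro k _
        by_cases hkx : k = x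
        · subst hkx; simp [List.count_append, List.count_cons, List.count_nil]; omega
        · simp [List.count_append, List.count_cons, List.count_nil, hkx, Ne.symm hkx]
      · intro y
        rw [h2 y]
        by_cases hyx : y = x
        · subst hyx
          simp only [List.count_append, List.count_cons_self, List.count_nil]
          omega
        · simp [List.count_append, List.count_cons, List.count_nil, Ne.symm hyx]

-- the append-if accumulation loop is List.filter (specialization of PySem.List.foldl_append_if)
theorem appendIf_filter {α : Type} (p : α → Bool) (xs : List α) :
    xs.foldl (fun res k => if p k then res ++ [k] else res) [] = xs.filter p := by
  simpa using PySem.List.foldl_append_if p (fun k => k) xs []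

-- A computes the same filter: keys of the counter dict with count 1, in first-occurrence order
theorem origin_eq_filter (a b : List Int) :
    origin a b = (PySem.Set.ofList (a ++ b)).filter (fun k => (a ++ b).count k == 1) := by
  unfold origin
  simp only [← PySem.Dict.getD_eq_get?_getD, PySem.Dict.foldl_insert_getD_add_one_eq_counter]
  refine Eq.trans (appendIf_filter (fun key => (PySem.Dict.counter (a ++ b)).getD key 0 == 1)
    ((PySem.Dict.counter (a ++ b)).keys)) ?_
  rw [PySem.Dict.keys_counter]
  apply List.filter_congr
  intro k _
  rw [Bool.eq_iff_iff]
  simp [PySem.Dict.getD_counter]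
  omega

theorem origin_spec : Claim_equal_origin := by
  intro a b _
  unfold Spec_origin origin_alt
  rw [origin_eq_filter, PySem.Dict.keys, (alt_loop_inv (a ++ b)).1]
  simp [Function.comp_def]
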